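-- pv_equiv track=rewrite | github.com/kelaplicativos-rgb/ia-planilhas | core/normalizer/detector.py | _escolher_melhor_coluna
-- ===== SOURCE A (Python) =====
-- def limpar_nome_coluna(col):
--     return (
--         str(col)
--         .strip()
--         .lower()
--         .replace("_", " ")
--         .replace("-", " ")
--         .replace("/", " ")
--         .replace("\\", " ")
--     )
--
-- def _pontuar_coluna(nome_coluna, variacoes):
--     """
--     Retorna uma pontuação para escolher a melhor coluna.
--     Quanto maior, melhor.
--     """
--     nome = limpar_nome_coluna(nome_coluna)
--     score = 0
--
--     for alvo in variacoes:
--         alvo = limpar_nome_coluna(alvo)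
--
--         if nome == alvo:
--             score = max(score, 100)
--         elif nome.startswith(alvo):
--             score = max(score, 90)
--         elif alvo in nome:
--             score = max(score, 70)
--
--     return score
--
-- def _escolher_melhor_coluna(colunas, variacoes):
--     melhor_coluna = None
--     melhor_score = 0
--
--     for col in colunas:
--         score = _pontuar_coluna(col, variacoes)
--         if score > melhor_score:
--             melhor_score = score
--             melhor_coluna = col
--
--     return melhor_coluna
-- ===== SOURCE B (Python) =====
-- def limpar_nome_coluna(col):
--     return (
--         str(col)
--         .strip()
--         .lower()
--         .replace("_", " ")
--         .replace("-", " ")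
--         .replace("/", " ")
--         .replace("\\", " ")
--     )
--
-- def _escolher_melhor_coluna(colunas, variacoes):
--     alvos = [limpar_nome_coluna(v) for v in variacoes]
--
--     def _score(col):
--         nome = limpar_nome_coluna(col)
--         if any(a == nome for a in alvos):
--             return 100
--         if any(nome.startswith(a) for a in alvos):
--             return 90
--         if any(a in nome for a in alvos):
--             return 70
--         return 0
--
--     scores = [_score(c) for c in colunas]
--     if not scores:
--         return None
--     best = max(scores)
--     if best == 0:
--         return None
--     return colunas[scores.index(best)]
-- ===== Notes on version B (the rewrite author's own statement) =====
-- stated objective: faster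
-- what changed: Variations are cleaned once up front instead of re-cleaned for every column; the per-column max-accumulating scoring loop becomes three short-circuiting tiered any() passes (equal / prefix / substring), and the first-wins strict selection loop becomes building the score list and indexing the first occurrence of its maximum (None when the maximum is 0).
import Mathlib
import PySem

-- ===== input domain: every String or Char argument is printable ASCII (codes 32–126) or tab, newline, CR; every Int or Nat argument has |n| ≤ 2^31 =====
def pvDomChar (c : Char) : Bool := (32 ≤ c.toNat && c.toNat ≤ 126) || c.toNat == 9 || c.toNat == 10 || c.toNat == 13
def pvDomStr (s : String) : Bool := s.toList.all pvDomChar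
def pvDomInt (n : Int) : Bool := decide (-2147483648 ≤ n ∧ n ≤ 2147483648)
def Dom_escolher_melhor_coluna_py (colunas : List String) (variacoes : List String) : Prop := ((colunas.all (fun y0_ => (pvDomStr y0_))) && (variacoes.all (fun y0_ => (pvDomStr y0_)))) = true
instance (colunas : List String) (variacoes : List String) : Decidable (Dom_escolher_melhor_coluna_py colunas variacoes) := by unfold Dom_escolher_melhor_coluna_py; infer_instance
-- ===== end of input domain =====

-- B cleans variations once and scores each column with three tiered any-passes, then picks the
-- column at the first index of the maximal score (None if the maximum is 0); same results as A.


-- ===== PORT A =====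
-- limpar_nome_coluna (shared module helper; str(col) is the identity on str input)
def pvLimpar (col : String) : String :=
  PySem.Str.replace (PySem.Str.replace (PySem.Str.replace (PySem.Str.replace
    (PySem.Str.lower (PySem.Str.strip col)) "_" " ") "-" " ") "/" " ") "\\" " "

-- _pontuar_coluna: running-max loop over the variations, cleaning each inside the loop
def pvPontuar (nome_coluna : String) (variacoes : List String) : Nat :=
  let nome := pvLimpar nome_coluna
  variacoes.foldl (fun score alvo0 =>
    let alvo := pvLimpar alvo0
    if nome = alvo then max score 100
    else if PySem.Str.startswith nome alvo then max score 90
    else if PySem.Str.isIn alvo nome then max score 70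
    else score) 0

def escolher_melhor_coluna_py (colunas : List String) (variacoes : List String) : Option String :=
  (colunas.foldl (fun st col =>
    let score := pvPontuar col variacoes
    if st.2 < score then (some col, score) else st)
    ((none : Option String), (0 : Nat))).1

-- ===== PORT B =====
-- _score: three tiered any-passes over the pre-cleaned variations
def pvScoreB (alvos : List String) (col : String) : Nat :=
  let nome := pvLimpar col
  if alvos.any (fun a => a == nome) then 100
  else if alvos.any (fun a => PySem.Str.startswith nome a) then 90
  else if alvos.any (fun a => PySem.Str.isIn a nome) then 70
  else 0

def escolher_melhor_coluna_py_alt (colunas : List String) (variacoes : List String) : Option String :=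
  let alvos := variacoes.map pvLimpar
  let scores := colunas.map (pvScoreB alvos)
  if scores = [] then none
  else
    match PySem.List.max? scores (fun x => x) with
    | none => none
    | some best =>
      if best = 0 then none
      else
        match PySem.List.index? scores best with
        | none => none
        | some i => PySem.List.pyGet? colunas (i : Int)

-- ===== PRECONDITION & SPEC =====
def Spec_escolher_melhor_coluna_py (colunas : List String) (variacoes : List String) (out : Option String) : Prop := out = escolher_melhor_coluna_py_alt colunas variacoes
instance (colunas : List String) (variacoes : List String) (out : Option String) : Decidable (Spec_escolher_melhor_coluna_py colunas variacoes out) := by unfold Spec_escolher_melhor_coluna_py; infer_instance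

-- ===== CLAIM (what is proved, stated in full; the proofs are below) =====
def Claim_equal_escolher_melhor_coluna_py : Prop := ∀ (colunas : List String) (variacoes : List String), Dom_escolher_melhor_coluna_py colunas variacoes → Spec_escolher_melhor_coluna_py colunas variacoes (escolher_melhor_coluna_py colunas variacoes)

-- ===== LEMMAS AND PROOFS =====

-- per-variation score of A's loop body
def pvF (nome a : String) : Nat :=
  if nome = a then 100
  else if PySem.Str.startswith nome a then 90
  else if PySem.Str.isIn a nome then 70
  else 0

-- B's tiered score, on an already-cleaned name
def pvTier (nome : String) (alvos : List String) : Nat :=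
  if alvos.any (fun a => a == nome) then 100
  else if alvos.any (fun a => PySem.Str.startswith nome a) then 90
  else if alvos.any (fun a => PySem.Str.isIn a nome) then 70
  else 0

theorem pvScoreB_eq_tier (alvos : List String) (col : String) :
    pvScoreB alvos col = pvTier (pvLimpar col) alvos := rfl

theorem pvTier_nil (nome : String) : pvTier nome [] = 0 := by simp [pvTier]

theorem pvTier_cons (nome a : String) (l : List String) :
    pvTier nome (a :: l) = max (pvF nome a) (pvTier nome l) := by
  simp only [pvTier, pvF, List.any_cons, Bool.or_eq_true, beq_iff_eq]
  simp only [show (nome = a) ↔ (a = nome) from eq_comm]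
  split_ifs <;> first | omega | tauto

theorem pvFold_eq (vs : List String) (s : Nat) (nome : String) :
    vs.foldl (fun score alvo0 =>
      let alvo := pvLimpar alvo0
      if nome = alvo then max score 100
      else if PySem.Str.startswith nome alvo then max score 90
      else if PySem.Str.isIn alvo nome then max score 70
      else score) s
    = max s (pvTier nome (vs.map pvLimpar)) := by
  induction vs generalizing s with
  | nil => simp [pvTier_nil]
  | cons v t ih =>
    simp only [List.foldl_cons, List.map_cons, pvTier_cons, ih]
    have hstep : (let alvo := pvLimpar v;
        if nome = alvo then max s 100
        else if PySem.Str.startswith nome alvo then max s 90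
        else if PySem.Str.isIn alvo nome then max s 70
        else s) = max s (pvF nome (pvLimpar v)) := by
      simp only [pvF]; split_ifs <;> omega
    rw [hstep]; omega

theorem pvPontuar_eq (c : String) (vs : List String) :
    pvPontuar c vs = pvScoreB (vs.map pvLimpar) c := by
  rw [pvScoreB_eq_tier, pvPontuar, pvFold_eq]; omega

-- A's selection loop, characterised
theorem pvOuter (g : String → Nat) (cols : List String) (mc : Option String) (ms : Nat) :
    cols.foldl (fun st col =>
      let score := g col
      if st.2 < score then (some col, score) else st) (mc, ms)
    = ((if ms < (cols.map g).foldl max ms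
          then cols.find? (fun c => g c == (cols.map g).foldl max ms)
          else mc),
       (cols.map g).foldl max ms) := by
  induction cols generalizing mc ms with
  | nil => simp
  | cons c t ih =>
    simp only [List.foldl_cons, List.map_cons, List.find?]
    by_cases h : ms < g c
    · rw [if_pos h, ih]
      have hmax : max ms (g c) = g c := by omega
      rw [hmax]
      have hgle : g c ≤ (t.map g).foldl max (g c) := (PySem.List.le_foldl_max (t.map g) (g c)).1
      by_cases he : g c = (t.map g).foldl max (g c)
      · have : ¬ g c < (t.map g).foldl max (g c) := by omega
        simp [← he, h]
      · have hlt : g c < (t.map g).foldl max (g c) := by omega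
        have hms : ms < (t.map g).foldl max (g c) := by omega
        simp [hlt, hms, beq_eq_false_iff_ne.mpr he]
    · rw [if_neg h, ih]
      have hmax : max ms (g c) = ms := by omega
      rw [hmax]
      by_cases hlt : ms < (t.map g).foldl max ms
      · have hne : g c ≠ (t.map g).foldl max ms := by omega
        simp [hlt, beq_eq_false_iff_ne.mpr hne]
      · simp [hlt]

-- first index of the maximum, read back through the column list
theorem pvIdxFind (g : String → Nat) (cols : List String) (M : Nat) :
    (match PySem.List.index? (cols.map g) M with
     | none => (none : Option String)
     | some i => PySem.List.pyGet? cols (i : Int))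
    = cols.find? (fun c => g c == M) := by
  induction cols with
  | nil => simp [PySem.List.index?]
  | cons c t ih =>
    by_cases h : g c = M
    · subst h
      rw [List.map_cons, PySem.List.index?_cons_self]
      simp [List.find?]
    · rw [List.map_cons, PySem.List.index?_cons_of_ne (t.map g) h, List.find?,
        ← ih]
      simp only [beq_eq_false_iff_ne.mpr h]
      cases hi : PySem.List.index? (t.map g) M with
      | none => simp
      | some i => simp

-- ===== VERDICT (by name: the statement is the Claim_ definition above) =====
theorem escolher_melhor_coluna_py_spec : Claim_equal_escolher_melhor_coluna_py := by
  intro colunas variacoes _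
  unfold Spec_escolher_melhor_coluna_py escolher_melhor_coluna_py escolher_melhor_coluna_py_alt
  simp only [pvPontuar_eq]
  rw [pvOuter (pvScoreB (variacoes.map pvLimpar)) colunas none 0]
  cases colunas with
  | nil => simp
  | cons c t =>
    set g := pvScoreB (variacoes.map pvLimpar) with hg
    simp only [List.map_cons]
    have hne : (g c :: t.map g) ≠ [] := by simp
    rw [if_neg hne, PySem.List.max?_id_cons]
    have hM : (g c :: t.map g).foldl max 0 = (t.map g).foldl max (g c) := by
      simp
    by_cases hz : (t.map g).foldl max (g c) = 0
    · simp [hM, hz]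
    · have hpos : 0 < (g c :: t.map g).foldl max 0 := by rw [hM]; omega
      rw [if_pos hpos]
      have hidx := pvIdxFind g (c :: t) ((t.map g).foldl max (g c))
      simp only [List.map_cons] at hidx
      simp only [hM, if_neg hz, hidx]
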